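-- pv_equiv track=rewrite | github.com/dsalazar444/analizadorSintacticoSLR1_LL1 | api.py | parse_producciones
-- ===== SOURCE A (Python) =====
-- from typing import Dict, List, Optional
--
-- def parse_producciones(prods: Dict[str, List[str]]) -> Dict[str, List[List[str]]]:
--     """
--     Convierte las producciones de la interfaz (dict[str, list[str]]) a dict[str, list[list[str]]]
--     Si la producción tiene espacios, se asume que los símbolos están separados por espacio.
--     Si no, cada carácter es un símbolo (para compatibilidad con la interfaz actual).
--     """
--     result = {}
--     for nt, alternativas in prods.items():
--         result[nt] = []
--         for prod in alternativas:
--             prod = prod.strip()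
--             if not prod:
--                 continue
--             # Si los símbolos están separados por espacio, ej: "id + id $"
--             if " " in prod:
--                 symbols = prod.split()
--             else:
--                 # Soporta símbolos como id, E', etc.
--                 symbols = []
--                 i = 0
--                 while i < len(prod):
--                     if i+1 < len(prod) and prod[i+1] == "'":
--                         symbols.append(prod[i:i+2])
--                         i += 2
--                     else:
--                         symbols.append(prod[i])
--                         i += 1
--             result[nt].append(symbols)
--     return result
-- ===== SOURCE B (Python) =====
-- from typing import Dict, List
--
-- def _tokenize(s: str) -> List[str]:
--     # s is already stripped and non-empty
--     if " " in s:
--         return s.split()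
--     toks: List[str] = []
--     for c in s:
--         if c == "'" and toks and len(toks[-1]) == 1:
--             toks[-1] += c
--         else:
--             toks.append(c)
--     return toks
--
-- def parse_producciones(prods: Dict[str, List[str]]) -> Dict[str, List[List[str]]]:
--     return {
--         nt: [_tokenize(s) for s in (p.strip() for p in alts) if s]
--         for nt, alts in prods.items()
--     }
-- ===== Notes on version B (the rewrite author's own statement) =====
-- stated objective: idiomatic
-- what changed: The manual index-cursor while-loop with lookahead is replaced by a single left-to-right fold that glues an apostrophe onto the previous one-character token, and the nested mutate-a-result-dict loops become a dict comprehension over a stripped-and-filtered generator.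
import Mathlib
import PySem

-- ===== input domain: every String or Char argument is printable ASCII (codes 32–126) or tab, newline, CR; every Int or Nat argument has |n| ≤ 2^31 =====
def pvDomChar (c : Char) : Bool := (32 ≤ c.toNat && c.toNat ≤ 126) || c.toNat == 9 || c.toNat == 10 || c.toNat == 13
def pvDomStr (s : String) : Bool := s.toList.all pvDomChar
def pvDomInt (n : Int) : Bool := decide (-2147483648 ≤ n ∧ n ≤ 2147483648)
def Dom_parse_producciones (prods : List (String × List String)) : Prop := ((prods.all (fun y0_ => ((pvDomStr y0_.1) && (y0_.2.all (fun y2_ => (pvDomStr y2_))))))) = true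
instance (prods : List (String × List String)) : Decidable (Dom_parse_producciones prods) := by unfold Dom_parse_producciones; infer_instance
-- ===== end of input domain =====

-- B replaces A's index-cursor tokenizer by a left fold gluing apostrophes onto the
-- previous one-character token, and the result-dict mutation loops by a dict comprehension.

-- ===== PORT A =====
-- the while-loop over index i with lookahead prod[i+1] == "'"
def pyATok : List Char → List (List Char)
  | [] => []
  | [c] => [[c]]
  | c :: c2 :: rest => if c2 = '\'' then (c :: [c2]) :: pyATok rest else [c] :: pyATok (c2 :: rest)

-- the 'symbols = …' block of A, on the already-stripped production
def pyASymbols (prod : String) : List String :=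
  if ' ' ∈ prod.toList then PySem.Str.split₀ prod
  else (pyATok prod.toList).map (fun t => String.ofList t)

def parse_producciones (prods : List (String × List String)) : List (String × List (List String)) :=
  (prods.foldl
    (fun (result : PySem.Dict String (List (List String))) p =>
      p.2.foldl
        (fun result prodRaw =>
          let prod := PySem.Str.strip prodRaw
          if prod = "" then result
          else result.modify p.1 [] (fun l => l ++ [pyASymbols prod]))
        (result.insert p.1 ([] : List (List String))))
    PySem.Dict.empty).items

-- ===== PORT B =====
-- B's glue fold: apostrophe joins the previous token iff that token has length 1
def glueStep (acc : List (List Char)) (c : Char) : List (List Char) :=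
  match acc with
  | t :: rest => if c = '\'' ∧ t.length = 1 then (t ++ [c]) :: rest else [c] :: t :: rest
  | [] => [[c]]

def tokenizeB (s : String) : List String :=
  if ' ' ∈ s.toList then PySem.Str.split₀ s
  else ((s.toList.foldl glueStep []).reverse).map (fun t => String.ofList t)

def parse_producciones_alt (prods : List (String × List String)) : List (String × List (List String)) :=
  (prods.foldl
    (fun (d : PySem.Dict String (List (List String))) p =>
      d.insert p.1 (((p.2.map PySem.Str.strip).filter (fun s => s ≠ "")).map tokenizeB))
    PySem.Dict.empty).items

-- ===== PRECONDITION & SPEC =====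
def Spec_parse_producciones (prods : List (String × List String)) (out : List (String × List (List String))) : Prop := out = parse_producciones_alt prods
instance (prods : List (String × List String)) (out : List (String × List (List String))) : Decidable (Spec_parse_producciones prods out) := by unfold Spec_parse_producciones; infer_instance

-- ===== CLAIM (what is proved, stated in full; the proofs are below) =====
def Claim_equal_parse_producciones : Prop := ∀ (prods : List (String × List String)), Dom_parse_producciones prods → Spec_parse_producciones prods (parse_producciones prods)

-- ===== LEMMAS AND PROOFS =====

-- B's glue fold produces A's tokens, in reverse, in front of any accumulator whose
-- head token is safe (no glue can fire at the boundary).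
theorem glue_fold_eq (cs : List Char) (acc : List (List Char))
    (h : ∀ t ts, acc = t :: ts → t.length = 1 → cs.head? ≠ some '\'') :
    List.foldl glueStep acc cs = (pyATok cs).reverse ++ acc := by
  match cs with
  | [] => simp [pyATok]
  | [c] =>
    have hstep : glueStep acc c = [c] :: acc := by
      cases acc with
      | nil => rfl
      | cons t ts =>
        have : ¬ (c = '\'' ∧ t.length = 1) := by
          rintro ⟨hc, hl⟩
          exact (h t ts rfl hl) (by simp [hc])
        simp [glueStep, this]
    simp [pyATok, hstep]
  | c :: c2 :: rest =>
    have hstep : glueStep acc c = [c] :: acc := by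
      cases acc with
      | nil => rfl
      | cons t ts =>
        have : ¬ (c = '\'' ∧ t.length = 1) := by
          rintro ⟨hc, hl⟩
          exact (h t ts rfl hl) (by simp [hc])
        simp [glueStep, this]
    by_cases hc2 : c2 = '\''
    · have hstep2 : glueStep ([c] :: acc) c2 = ([c] ++ [c2]) :: acc := by
        simp [glueStep, hc2]
      have ih := glue_fold_eq rest (([c] ++ [c2]) :: acc)
        (by intro t ts ht hl; simp at ht; simp [← ht.1] at hl)
      simp only [List.foldl_cons, hstep, hstep2, ih]
      simp [pyATok, hc2]
    · have ih := glue_fold_eq (c2 :: rest) ([c] :: acc)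
        (by intro t ts ht hl; simp at ht; simp [hc2])
      simp only [List.foldl_cons, hstep] at ih ⊢
      rw [ih]
      simp [pyATok, hc2]

theorem tokens_eq (cs : List Char) :
    (List.foldl glueStep [] cs).reverse = pyATok cs := by
  rw [glue_fold_eq cs [] (by intro t ts ht; simp at ht)]
  simp

theorem symbols_eq (s : String) : pyASymbols s = tokenizeB s := by
  unfold pyASymbols tokenizeB
  rw [tokens_eq]

-- A's inner loop over the alternatives, started from result[nt] = [], ends as one insert
theorem inner_loop_eq (nt : String) (alts : List String)
    (d : PySem.Dict String (List (List String))) (acc : List (List String)) :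
    alts.foldl
      (fun result prodRaw =>
        let prod := PySem.Str.strip prodRaw
        if prod = "" then result
        else result.modify nt [] (fun l => l ++ [pyASymbols prod]))
      (d.insert nt acc)
    = d.insert nt (acc ++ ((alts.map PySem.Str.strip).filter (fun s => s ≠ "")).map tokenizeB) := by
  induction alts generalizing acc with
  | nil => simp
  | cons p rest ih =>
    by_cases hp : PySem.Str.strip p = ""
    · simpa [hp] using ih acc
    · have hmod : (d.insert nt acc).modify nt [] (fun l => l ++ [pyASymbols (PySem.Str.strip p)])
          = d.insert nt (acc ++ [pyASymbols (PySem.Str.strip p)]) := by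
        simp [PySem.Dict.modify, PySem.Dict.getD_insert_self, PySem.Dict.insert_insert_self]
      simp only [List.foldl_cons]
      rw [if_neg hp, hmod, ih (acc ++ [pyASymbols (PySem.Str.strip p)])]
      simp [hp, symbols_eq]

-- the two outer folds agree from any starting dictionary
theorem outer_loop_eq (prods : List (String × List String))
    (d : PySem.Dict String (List (List String))) :
    prods.foldl
      (fun result p =>
        p.2.foldl
          (fun result prodRaw =>
            let prod := PySem.Str.strip prodRaw
            if prod = "" then result
            else result.modify p.1 [] (fun l => l ++ [pyASymbols prod]))
          (result.insert p.1 ([] : List (List String)))) d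
    = prods.foldl
        (fun d p =>
          d.insert p.1 (((p.2.map PySem.Str.strip).filter (fun s => s ≠ "")).map tokenizeB)) d := by
  induction prods generalizing d with
  | nil => rfl
  | cons p rest ih =>
    simp only [List.foldl_cons]
    rw [inner_loop_eq p.1 p.2 _ []]
    simp [ih]

-- ===== VERDICT (by name: the statement is the Claim_ definition above) =====
theorem parse_producciones_spec : Claim_equal_parse_producciones := by
  intro prods _
  unfold Spec_parse_producciones parse_producciones parse_producciones_alt
  rw [outer_loop_eq]
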